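-- pv_equiv track=rewrite | github.com/worldwindrose-hue/WorldWindRose | core/integrations/workspace/github.py | _select_files
-- ===== SOURCE A (Python) =====
-- _PRIORITY_FILES = {
--     "README.md", "README.rst", "README.txt", "readme.md",
--     "ARCHITECTURE.md", "DESIGN.md", "CONTRIBUTING.md",
--     "main.py", "app.py", "core/__init__.py", "setup.py",
--     "pyproject.toml", "package.json",
-- }
--
-- _PRIORITY_EXTENSIONS = {".md", ".rst", ".py", ".ts", ".js", ".yaml", ".yml", ".toml"}
--
-- def _select_files(paths: list[str], max_files: int) -> list[str]:
--     """Pick the most informative files to ingest."""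
--     selected: list[str] = []
--     # Priority 1: exact name matches
--     for p in paths:
--         fname = p.split("/")[-1]
--         if fname in _PRIORITY_FILES and p not in selected:
--             selected.append(p)
--     # Priority 2: by extension, top-level or core/ directory
--     for p in paths:
--         if len(selected) >= max_files:
--             break
--         ext = "." + p.rsplit(".", 1)[-1] if "." in p else ""
--         depth = p.count("/")
--         if ext in _PRIORITY_EXTENSIONS and depth <= 2 and p not in selected:
--             selected.append(p)
--     return selected[:max_files]
-- ===== SOURCE B (Python) =====
-- _PRIORITY_FILES = {
--     "README.md", "README.rst", "README.txt", "readme.md",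
--     "ARCHITECTURE.md", "DESIGN.md", "CONTRIBUTING.md",
--     "main.py", "app.py", "core/__init__.py", "setup.py",
--     "pyproject.toml", "package.json",
-- }
--
-- _PRIORITY_EXTENSIONS = {".md", ".rst", ".py", ".ts", ".js", ".yaml", ".yml", ".toml"}
--
--
-- def _select_files(paths: list[str], max_files: int) -> list[str]:
--     """Pick the most informative files to ingest (single classifying pass)."""
--     seen = set()
--     rank0: list[str] = []  # exact-name matches, first occurrences in order
--     rank1: list[str] = []  # extension matches (depth <= 2), not rank 0
--     for p in paths:
--         if p in seen:
--             continue
--         seen.add(p)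
--         fname = p.split("/")[-1]
--         if fname in _PRIORITY_FILES:
--             rank0.append(p)
--         else:
--             ext = "." + p.rsplit(".", 1)[-1] if "." in p else ""
--             if ext in _PRIORITY_EXTENSIONS and p.count("/") <= 2:
--                 rank1.append(p)
--     take = max(0, max_files - len(rank0))
--     return (rank0 + rank1[:take])[:max_files]
-- ===== Notes on version B (the rewrite author's own statement) =====
-- stated objective: faster
-- what changed: Replaces A's two full scans of paths (name matches, then extension matches with an in-loop budget check and an O(k) membership scan of the growing selected list) by a single classifying pass that dedups by first occurrence with a hash seen-set and collects rank-0 and rank-1 lists, followed by an arithmetic assembly step (rank0 + rank1[:max(0, max_files-len(rank0))])[:max_files].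
import Mathlib
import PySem

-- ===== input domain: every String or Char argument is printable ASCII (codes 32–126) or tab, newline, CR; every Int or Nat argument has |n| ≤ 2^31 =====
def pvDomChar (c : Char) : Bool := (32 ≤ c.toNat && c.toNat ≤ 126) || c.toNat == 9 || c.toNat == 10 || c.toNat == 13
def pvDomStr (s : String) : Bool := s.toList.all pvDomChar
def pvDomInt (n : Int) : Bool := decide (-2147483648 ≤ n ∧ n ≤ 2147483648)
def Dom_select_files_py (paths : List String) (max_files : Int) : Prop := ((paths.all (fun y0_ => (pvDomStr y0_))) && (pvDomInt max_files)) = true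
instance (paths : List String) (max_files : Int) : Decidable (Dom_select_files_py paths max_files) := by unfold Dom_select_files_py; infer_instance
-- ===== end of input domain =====

-- B replaces A's two full scans of `paths` by a single classifying pass (dedup + rank 0/1) plus
-- an arithmetic assembly step; same return value (objective: alternative decomposition).

-- ===== PORT A =====
-- module constants (Python sets of strings; distinct literals, membership only)
def priorityFiles : List String :=
  ["README.md", "README.rst", "README.txt", "readme.md",
   "ARCHITECTURE.md", "DESIGN.md", "CONTRIBUTING.md",
   "main.py", "app.py", "core/__init__.py", "setup.py",
   "pyproject.toml", "package.json"]

def priorityExts : List String := [".md", ".rst", ".py", ".ts", ".js", ".yaml", ".yml", ".toml"]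

-- p.split("/")[-1]; split? with nonempty sep always returns a nonempty some-list, so the getD defaults never fire
def fnameOf (p : String) : String :=
  (PySem.List.pyGet? ((PySem.Str.split? p "/").getD []) (-1)).getD ""

-- '"." + p.rsplit(".", 1)[-1] if "." in p else ""' — PySem has no rsplit; p.rsplit(".",1)[-1] is
-- the suffix after the LAST '.', exactly p[rfind(p,".")+1:] when "." in p (exact on that guard)
def extOf (p : String) : String :=
  if PySem.Str.isIn "." p then "." ++ PySem.Str.slice p (some (PySem.Str.rfind p "." + 1)) none else ""

-- fname in _PRIORITY_FILES
def isPrio1 (p : String) : Bool := priorityFiles.contains (fnameOf p)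
-- ext in _PRIORITY_EXTENSIONS and depth <= 2   (depth = p.count("/"))
def isPrio2 (p : String) : Bool := priorityExts.contains (extOf p) && PySem.Str.count p "/" ≤ 2

-- first loop: exact name matches
def selStep1 (sel : List String) (p : String) : List String :=
  if isPrio1 p && !sel.contains p then sel ++ [p] else sel

-- second loop, with the break on len(selected) >= max_files
def selLoop2 (mf : Int) (sel : List String) : List String → List String
  | [] => sel
  | p :: rest =>
    if mf ≤ (sel.length : Int) then sel
    else if isPrio2 p && !sel.contains p then selLoop2 mf (sel ++ [p]) rest
    else selLoop2 mf sel rest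

def select_files_py (paths : List String) (max_files : Int) : List String :=
  PySem.List.slice (selLoop2 max_files (paths.foldl selStep1 []) paths) none (some max_files)

-- ===== PORT B =====
-- one classifying pass: state (seen, rank0, rank1)
def classifyStep (st : PySem.Set String × List String × List String) (p : String) :
    PySem.Set String × List String × List String :=
  if PySem.Set.contains st.1 p then st
  else
    let seen := PySem.Set.add st.1 p
    if isPrio1 p then (seen, st.2.1 ++ [p], st.2.2)
    else if isPrio2 p then (seen, st.2.1, st.2.2 ++ [p])
    else (seen, st.2.1, st.2.2)

def select_files_py_alt (paths : List String) (max_files : Int) : List String :=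
  let st := paths.foldl classifyStep (PySem.Set.empty, [], [])
  let take := max 0 (max_files - st.2.1.length)
  PySem.List.slice (st.2.1 ++ PySem.List.slice st.2.2 none (some take)) none (some max_files)

-- ===== PRECONDITION & SPEC =====
def Spec_select_files_py (paths : List String) (max_files : Int) (out : List String) : Prop := out = select_files_py_alt paths max_files
instance (paths : List String) (max_files : Int) (out : List String) : Decidable (Spec_select_files_py paths max_files out) := by unfold Spec_select_files_py; infer_instance

-- ===== CLAIM (what is proved, stated in full; the proofs are below) =====
def Claim_equal_select_files_py : Prop := ∀ (paths : List String) (max_files : Int), Dom_select_files_py paths max_files → Spec_select_files_py paths max_files (select_files_py paths max_files)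

-- ===== LEMMAS AND PROOFS =====

-- first occurrences of paths not in seen, in order
def dd (seen : List String) : List String → List String
  | [] => []
  | p :: r => if seen.contains p then dd seen r else p :: dd (seen ++ [p]) r

-- the candidate stream of A's second loop (relative dedup on appended candidates only)
def cnd (seen : List String) : List String → List String
  | [] => []
  | p :: r =>
    if !isPrio1 p && isPrio2 p && !seen.contains p then p :: cnd (seen ++ [p]) r
    else cnd seen r

lemma dd_cons (seen : List String) (q : String) (r : List String) :
    dd seen (q :: r) = if seen.contains q then dd seen r else q :: dd (seen ++ [q]) r := rfl

lemma cnd_cons (seen : List String) (q : String) (r : List String) :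
    cnd seen (q :: r) =
      if !isPrio1 q && isPrio2 q && !seen.contains q then q :: cnd (seen ++ [q]) r
      else cnd seen r := rfl

lemma selLoop2_cons (mf : Int) (sel : List String) (q : String) (r : List String) :
    selLoop2 mf sel (q :: r) =
      if mf ≤ (sel.length : Int) then sel
      else if isPrio2 q && !sel.contains q then selLoop2 mf (sel ++ [q]) r
      else selLoop2 mf sel r := rfl

lemma mem_dd (paths : List String) : ∀ (seen : List String) (p : String),
    p ∈ dd seen paths ↔ p ∈ paths ∧ p ∉ seen := by
  induction paths with
  | nil => intro seen p; simp [dd]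
  | cons q r ih =>
    intro seen p
    by_cases hq : q ∈ seen
    · rw [dd_cons, if_pos (by simpa using hq), ih]
      constructor
      · rintro ⟨h1, h2⟩; exact ⟨List.mem_cons_of_mem q h1, h2⟩
      · rintro ⟨h1, h2⟩
        rcases List.mem_cons.mp h1 with rfl | h
        · exact absurd hq h2
        · exact ⟨h, h2⟩
    · rw [dd_cons, if_neg (by simpa using hq), List.mem_cons, ih]
      constructor
      · rintro (rfl | ⟨h1, h2⟩)
        · exact ⟨List.mem_cons_self, hq⟩
        · exact ⟨List.mem_cons_of_mem q h1, fun hc => h2 (List.mem_append_left _ hc)⟩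
      · rintro ⟨h1, h2⟩
        by_cases hpq : p = q
        · exact Or.inl hpq
        · right
          rcases List.mem_cons.mp h1 with rfl | h
          · exact absurd rfl hpq
          · refine ⟨h, fun hc => ?_⟩
            rcases List.mem_append.mp hc with hc | hc
            · exact h2 hc
            · exact hpq (by simpa using hc)

-- A's first loop computes the isPrio1-filter of the first-occurrence stream
lemma loop1_eq (paths : List String) : ∀ (acc seen : List String),
    (∀ p, isPrio1 p = true → (p ∈ acc ↔ p ∈ seen)) →
    paths.foldl selStep1 acc = acc ++ (dd seen paths).filter isPrio1 := by
  induction paths with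
  | nil => intro acc seen _; simp [dd]
  | cons q r ih =>
    intro acc seen hinv
    by_cases hq : q ∈ seen
    · rw [List.foldl_cons, dd_cons, if_pos (by simpa using hq)]
      have hstep : selStep1 acc q = acc := by
        unfold selStep1
        by_cases h1 : isPrio1 q
        · have : q ∈ acc := (hinv q h1).mpr hq
          simp [h1, this]
        · simp [h1]
      rw [hstep]; exact ih acc seen hinv
    · rw [List.foldl_cons, dd_cons, if_neg (by simpa using hq)]
      by_cases h1 : isPrio1 q
      · have hqa : q ∉ acc := fun hc => hq ((hinv q h1).mp hc)
        have hstep : selStep1 acc q = acc ++ [q] := by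
          unfold selStep1; simp [h1, hqa]
        rw [hstep, ih (acc ++ [q]) (seen ++ [q])
          (fun p hp => by rw [List.mem_append, List.mem_append, hinv p hp])]
        simp [h1]
      · have hstep : selStep1 acc q = acc := by unfold selStep1; simp [h1]
        rw [hstep, ih acc (seen ++ [q]) (fun p hp => by
          rw [hinv p hp, List.mem_append]
          constructor
          · exact Or.inl
          · rintro (h | h)
            · exact h
            · simp at h; exact absurd (h ▸ hp) (by simp [h1]))]
        simp [h1]

-- the candidate stream is the rank-1 filter of the first-occurrence stream
lemma cnd_eq_dd_filter (paths : List String) : ∀ (seenC seenD : List String),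
    (∀ p, (!isPrio1 p && isPrio2 p) = true → (p ∈ seenC ↔ p ∈ seenD)) →
    cnd seenC paths = (dd seenD paths).filter (fun p => !isPrio1 p && isPrio2 p) := by
  induction paths with
  | nil => intro _ _ _; simp [cnd, dd]
  | cons q r ih =>
    intro seenC seenD hinv
    by_cases hq : q ∈ seenD
    · rw [dd_cons, if_pos (by simpa using hq), cnd_cons]
      rw [if_neg (by
        by_cases h1 : (!isPrio1 q && isPrio2 q) = true
        · have : q ∈ seenC := (hinv q h1).mpr hq
          simp_all
        · simp_all)]
      exact ih seenC seenD hinv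
    · rw [dd_cons, if_neg (by simpa using hq), cnd_cons]
      by_cases h1 : (!isPrio1 q && isPrio2 q) = true
      · have hqc : q ∉ seenC := fun hc => hq ((hinv q h1).mp hc)
        rw [if_pos (by simp_all)]
        have h1' := h1
        rw [ih (seenC ++ [q]) (seenD ++ [q])
            (fun p hp => by rw [List.mem_append, List.mem_append, hinv p hp])]
        simp [h1']
      · have h1' : (!isPrio1 q && isPrio2 q) = false := by simp_all
        rw [if_neg (by simp_all)]
        simp only [List.filter_cons, h1', Bool.false_eq_true, if_false]
        exact ih seenC (seenD ++ [q]) (fun p hp => by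
          rw [hinv p hp, List.mem_append]
          constructor
          · exact Or.inl
          · rintro (h | h)
            · exact h
            · simp at h; exact absurd (h ▸ hp) h1)

-- A's second loop appends the first (mf - |sel|) candidates
lemma loop2_eq (mf : Int) (paths : List String) : ∀ (sel seen : List String),
    (∀ p, p ∈ paths → (p ∈ sel ↔ (isPrio1 p = true ∨ p ∈ seen))) →
    selLoop2 mf sel paths = sel ++ (cnd seen paths).take (mf - sel.length).toNat := by
  induction paths with
  | nil => intro sel seen _; simp [selLoop2, cnd]
  | cons q r ih =>
    intro sel seen hinv
    rw [selLoop2_cons, cnd_cons]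
    by_cases hbreak : mf ≤ (sel.length : Int)
    · have h0 : (mf - sel.length).toNat = 0 := by omega
      rw [if_pos hbreak, h0]
      simp
    · rw [if_neg hbreak]
      have hlen : (mf - sel.length).toNat = (mf - ((sel.length : Int) + 1)).toNat + 1 := by omega
      by_cases hcond : (isPrio2 q && !sel.contains q) = true
      · have hq2 : isPrio2 q := by simp_all
        have hqs : q ∉ sel := by simp_all
        have hq1 : ¬ isPrio1 q = true := fun h => hqs ((hinv q (by simp)).mpr (Or.inl h))
        have hqseen : q ∉ seen := fun h => hqs ((hinv q (by simp)).mpr (Or.inr h))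
        rw [if_pos hcond, if_pos (by simp_all),
          ih (sel ++ [q]) (seen ++ [q]) (fun p hp => by
            rw [List.mem_append, List.mem_append, hinv p (by simp [hp]), or_assoc]),
          hlen]
        simp only [List.length_append, List.length_cons, List.length_nil, List.take_succ_cons]
        rw [show ((sel.length + (0 + 1) : Nat) : Int) = (sel.length : Int) + 1 by push_cast; ring]
        simp
      · rw [if_neg hcond, if_neg (by
          intro h
          have h1 : ¬ isPrio1 q = true := by simp_all
          have h2 : isPrio2 q = true := by simp_all
          have h3 : q ∉ seen := by simp_all
          have h4 : q ∉ sel := fun hc => by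
            rcases (hinv q (by simp)).mp hc with h5 | h5
            · exact h1 h5
            · exact h3 h5
          exact hcond (by simp_all))]
        exact ih sel seen (fun p hp => hinv p (by simp [hp]))

-- B's single pass computes the two filters of the first-occurrence stream
lemma classify_eq (paths : List String) : ∀ (seen r0 r1 : List String),
    paths.foldl classifyStep (seen, r0, r1) =
      (seen ++ dd seen paths,
       r0 ++ (dd seen paths).filter isPrio1,
       r1 ++ (dd seen paths).filter (fun p => !isPrio1 p && isPrio2 p)) := by
  induction paths with
  | nil => intro seen r0 r1; simp [dd]
  | cons q r ih =>
    intro seen r0 r1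
    by_cases hq : q ∈ seen
    · rw [List.foldl_cons, dd_cons, if_pos (by simpa using hq)]
      have hstep : classifyStep (seen, r0, r1) q = (seen, r0, r1) := by
        unfold classifyStep
        rw [if_pos (by simpa [PySem.Set.contains] using hq)]
      rw [hstep, ih]
    · rw [List.foldl_cons, dd_cons, if_neg (by simpa using hq)]
      have hadd : PySem.Set.add seen q = seen ++ [q] := PySem.Set.add_of_not_mem hq
      by_cases h1 : isPrio1 q
      · have hstep : classifyStep (seen, r0, r1) q = (seen ++ [q], r0 ++ [q], r1) := by
          unfold classifyStep
          rw [if_neg (by simpa [PySem.Set.contains] using hq)]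
          simp [hadd, h1]
        rw [hstep, ih]
        simp [h1]
      · by_cases h2 : isPrio2 q
        · have hstep : classifyStep (seen, r0, r1) q = (seen ++ [q], r0, r1 ++ [q]) := by
            unfold classifyStep
            rw [if_neg (by simpa [PySem.Set.contains] using hq)]
            simp [hadd, h1, h2]
          rw [hstep, ih]
          simp [h1, h2]
        · have hstep : classifyStep (seen, r0, r1) q = (seen ++ [q], r0, r1) := by
            unfold classifyStep
            rw [if_neg (by simpa [PySem.Set.contains] using hq)]
            simp [hadd, h1, h2]
          rw [hstep, ih]
          simp [h1, h2]

-- ===== VERDICT (by name: the statement is the Claim_ definition above) =====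
theorem select_files_py_spec : Claim_equal_select_files_py := by
  unfold Claim_equal_select_files_py
  intro paths mf _
  unfold Spec_select_files_py select_files_py select_files_py_alt
  simp only [PySem.Set.empty]
  rw [classify_eq paths [] [] []]
  simp only [List.nil_append]
  have hA1 : paths.foldl selStep1 [] = (dd [] paths).filter isPrio1 := by
    rw [loop1_eq paths [] [] (fun p _ => by simp)]
    simp
  have hmem : ∀ p, p ∈ paths →
      (p ∈ (dd [] paths).filter isPrio1 ↔ (isPrio1 p = true ∨ p ∈ ([] : List String))) := by
    intro p hp
    simp only [List.mem_filter, List.not_mem_nil, or_false]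
    constructor
    · exact fun h => h.2
    · intro h
      exact ⟨(mem_dd paths [] p).mpr ⟨hp, by simp⟩, h⟩
  have hA2 := loop2_eq mf paths ((dd [] paths).filter isPrio1) [] hmem
  have hcnd : cnd [] paths = (dd [] paths).filter (fun p => !isPrio1 p && isPrio2 p) :=
    cnd_eq_dd_filter paths [] [] (fun _ _ => Iff.rfl)
  rw [hA1, hA2, hcnd]
  have hnn : (0 : Int) ≤ max 0 (mf - ((dd [] paths).filter isPrio1).length) := le_max_left _ _
  rw [PySem.List.slice_to _ hnn]
  have ht : (max 0 (mf - (((dd [] paths).filter isPrio1).length : Int))).toNat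
      = (mf - (((dd [] paths).filter isPrio1).length : Int)).toNat := by omega
  rw [ht]
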